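-- pv_equiv track=rewrite | github.com/gfosso/Confinement | ed/ladder/ladder.py | lowestrepr
-- ===== SOURCE A (Python) =====
-- L=10
--
-- def readsite(conf,i): return (conf&(1<<i))>>i
--
-- def translate(conf):
-- 	elle=readsite(conf,L)
-- 	zero=readsite(conf,0)
-- 	if(elle==0):
-- 		return (conf>>1)|(zero<<(L-1))
-- 	else:
-- 		return((conf>>1)|(elle<<(2*L-1)))^((elle^zero)<<(L-1))
--
-- def lowestrepr(conf):
-- 	conf0=conf
-- 	conf1=conf
-- 	for i in range(L):
-- 		conf=translate(conf)
-- 		if conf1>conf: conf1=conf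
-- 		elif conf0==conf: return conf1,i+1
-- 	return conf1,L
-- ===== SOURCE B (Python) =====
-- L = 10
--
-- def readsite(conf, i): return (conf & (1 << i)) >> i
--
-- def translate(conf):
--     elle = readsite(conf, L)
--     zero = readsite(conf, 0)
--     if elle == 0:
--         return (conf >> 1) | (zero << (L - 1))
--     else:
--         return ((conf >> 1) | (elle << (2 * L - 1))) ^ ((elle ^ zero) << (L - 1))
--
-- def lowestrepr(conf):
--     # Build the translation orbit once, then scan it: the period is the first
--     # return to conf (or L), and the representative is the min over one period.
--     orbit = []
--     c = conf
--     for _ in range(L):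
--         c = translate(c)
--         orbit.append(c)
--     count = orbit.index(conf) + 1 if conf in orbit else L
--     return min([conf] + orbit[:count]), count
-- ===== Notes on version B (the rewrite author's own statement) =====
-- stated objective: simpler
-- what changed: A's single interleaved loop (running-min tracking, cycle test and early exit) is replaced by building the full translation orbit once, then finding the period with a list search and taking the min over one period in separate passes.
import Mathlib
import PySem

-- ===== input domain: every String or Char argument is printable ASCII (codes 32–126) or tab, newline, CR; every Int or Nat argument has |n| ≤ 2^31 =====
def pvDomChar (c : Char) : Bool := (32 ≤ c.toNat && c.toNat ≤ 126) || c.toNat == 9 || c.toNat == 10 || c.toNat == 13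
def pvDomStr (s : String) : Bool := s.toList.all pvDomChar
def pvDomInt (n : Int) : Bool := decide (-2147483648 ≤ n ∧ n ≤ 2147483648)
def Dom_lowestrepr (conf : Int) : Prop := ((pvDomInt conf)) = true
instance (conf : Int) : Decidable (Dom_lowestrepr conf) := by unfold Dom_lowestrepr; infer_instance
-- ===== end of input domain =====

-- B replaces A's interleaved min/cycle loop by: build the 10-step orbit once,
-- find the period by a list search, take the min over one period (objective: simpler).

-- ===== PORT A =====
def pyReadsite (conf : Int) (i : Nat) : Int := (PySem.Int.band conf ((1 : Int) <<< i)) >>> i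

def pyTranslate (conf : Int) : Int :=
  let elle := pyReadsite conf 10
  let zero := pyReadsite conf 0
  if elle = 0 then
    PySem.Int.bor (conf >>> 1) (zero <<< 9)
  else
    PySem.Int.bxor (PySem.Int.bor (conf >>> 1) (elle <<< 19)) ((PySem.Int.bxor elle zero) <<< 9)

-- A's for-loop over range(10): fuel counts remaining iterations, i is the range variable.
def lowestreprLoop (conf0 : Int) (fuel : Nat) (i : Nat) (conf conf1 : Int) : Int × Int :=
  match fuel with
  | 0 => (conf1, 10)
  | Nat.succ f =>
    let c := pyTranslate conf
    if conf1 > c then lowestreprLoop conf0 f (i + 1) c c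
    else if conf0 = c then (conf1, (i : Int) + 1)
    else lowestreprLoop conf0 f (i + 1) c conf1

def lowestrepr (conf : Int) : Int × Int := lowestreprLoop conf 10 0 conf conf

-- ===== PORT B =====
-- orbit = [translate(conf), pyTranslate^2(conf), …] of length n
def orbitFrom (conf : Int) (n : Nat) : List Int :=
  match n with
  | 0 => []
  | Nat.succ f => let c := pyTranslate conf; c :: orbitFrom c f

def lowestrepr_alt (conf : Int) : Int × Int :=
  let orbit := orbitFrom conf 10
  let count : Int :=
    match PySem.List.index? orbit conf with
    | some j => (j : Int) + 1
    | none => 10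
  ((PySem.List.slice orbit none (some count)).foldl min conf, count)

-- ===== PRECONDITION & SPEC =====
def Spec_lowestrepr (conf : Int) (out : Int × Int) : Prop := out = lowestrepr_alt conf
instance (conf : Int) (out : Int × Int) : Decidable (Spec_lowestrepr conf out) := by unfold Spec_lowestrepr; infer_instance

-- ===== CLAIM (what is proved, stated in full; the proofs are below) =====
def Claim_equal_lowestrepr : Prop := ∀ (conf : Int), Dom_lowestrepr conf → Spec_lowestrepr conf (lowestrepr conf)

-- ===== LEMMAS AND PROOFS =====

-- A's loop from any state equals: find conf0 in the remaining orbit, fold min over that prefix.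
theorem lowestreprLoop_eq (fuel : Nat) : ∀ (i : Nat) (conf0 conf conf1 : Int), conf1 ≤ conf0 →
    lowestreprLoop conf0 fuel i conf conf1 =
      match PySem.List.index? (orbitFrom conf fuel) conf0 with
      | some j => (((orbitFrom conf fuel).take (j + 1)).foldl min conf1, (i : Int) + (j : Int) + 1)
      | none => ((orbitFrom conf fuel).foldl min conf1, 10) := by
  induction fuel with
  | zero =>
    intro i conf0 conf conf1 _
    simp [lowestreprLoop, orbitFrom, PySem.List.index?]
  | succ f ih =>
    intro i conf0 conf conf1 h
    rw [lowestreprLoop, orbitFrom]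
    set c := pyTranslate conf with hc
    by_cases hgt : conf1 > c
    · -- conf0 ≠ c since c < conf1 ≤ conf0
      have hne : c ≠ conf0 := by omega
      rw [PySem.List.index?_cons_of_ne _ hne]
      rw [if_pos hgt, ih (i + 1) conf0 c c (by omega)]
      cases hidx : PySem.List.index? (orbitFrom c f) conf0 with
      | none =>
        simp only [Option.map_none]
        have : min conf1 c = c := by omega
        simp [List.foldl_cons, this]
      | some j =>
        simp only [Option.map_some]
        have : min conf1 c = c := by omega
        simp [List.foldl_cons, this]
        omega
    · rw [if_neg hgt]
      by_cases heq : conf0 = c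
      · rw [if_pos heq]
        have : PySem.List.index? (c :: orbitFrom c f) conf0 = some 0 := by
          rw [heq]; exact PySem.List.index?_cons_self _ _
        simp only [this]
        have : min conf1 c = conf1 := by omega
        simp [List.foldl_cons, this]
      · rw [if_neg heq]
        have hne : c ≠ conf0 := fun hh => heq hh.symm
        rw [PySem.List.index?_cons_of_ne _ hne]
        rw [ih (i + 1) conf0 c conf1 h]
        have hmin : min conf1 c = conf1 := by omega
        cases hidx : PySem.List.index? (orbitFrom c f) conf0 with
        | none =>
          simp [List.foldl_cons, hmin]
        | some j =>
          simp only [Option.map_some]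
          simp [List.foldl_cons, hmin]
          omega

-- ===== VERDICT (by name: the statement is the Claim_ definition above) =====
theorem lowestrepr_spec : Claim_equal_lowestrepr := by
  intro conf _
  unfold Spec_lowestrepr lowestrepr lowestrepr_alt
  rw [lowestreprLoop_eq 10 0 conf conf conf le_rfl]
  cases hidx : PySem.List.index? (orbitFrom conf 10) conf with
  | none =>
    simp only [hidx]
    rw [show ((10 : Int)) = ((10 : Nat) : Int) by norm_num, PySem.List.slice_to_natCast]
    have hlen : (orbitFrom conf 10).length = 10 := by
      simp [orbitFrom]
    rw [List.take_of_length_le (by omega)]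
  | some j =>
    simp only [hidx]
    rw [show ((j : Int) + 1) = (((j + 1 : Nat)) : Int) by push_cast; ring,
        PySem.List.slice_to_natCast]
    simp
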